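-- pv_equiv track=rewrite | github.com/Shenglei-Mao/how2series | how2py/didi/q2.py | solution
-- ===== SOURCE A (Python) =====
-- def dfs(g, visited, cur):
--     if cur in visited: return
--     visited.add(cur)
--     dfs(g, visited, g[cur])
--
-- def solution(A, B):
--     # write your code in Python 3.6
--     """
--     1. find all the nodes
--     2, check if num of edge is same to node, if not, return false
--     3. check if one node have only one in-degree edge and one out-degree edge
--     4. dfs
--     """
--     set_A = set(A)
--     set_B = set(B)
--     nodes = set_A.union(set_B)
--     if (len(nodes) != len(A)) or (len(nodes) != len(B)): return False  # check condition2
--     if (len(A) != len(set_A)) or (len(B) != len(set_B)): return False  # check condition3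
--     g = dict()
--     for i in range(len(A)):
--         from_node, to_node = A[i], B[i]
--         g[from_node] = to_node
--     visited = set()
--     dfs(g, visited, A[0])
--     return len(visited) == len(nodes)
-- ===== SOURCE B (Python) =====
-- def solution(A, B):
--     n = len(A)
--     if len(B) != n or len(set(A)) != n or set(A) != set(B):
--         return False
--     g = dict(zip(A, B))
--     start = A[0]
--     cur = g[start]
--     steps = 1
--     while cur != start and steps < n:
--         cur = g[cur]
--         steps += 1
--     return cur == start and steps == n
-- ===== Notes on version B (the rewrite author's own statement) =====
-- stated objective: faster
-- what changed: Replaces the recursive dfs with a visited set by a step-counting pointer chase: B walks the successor map from A[0] counting steps until it returns to the start (capped at n) and checks that the first-return time equals n; the guards are condensed to len(B)==n, A duplicate-free and set(A)==set(B), and g is built with dict(zip(A,B)) instead of an index loop.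
import Mathlib
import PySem

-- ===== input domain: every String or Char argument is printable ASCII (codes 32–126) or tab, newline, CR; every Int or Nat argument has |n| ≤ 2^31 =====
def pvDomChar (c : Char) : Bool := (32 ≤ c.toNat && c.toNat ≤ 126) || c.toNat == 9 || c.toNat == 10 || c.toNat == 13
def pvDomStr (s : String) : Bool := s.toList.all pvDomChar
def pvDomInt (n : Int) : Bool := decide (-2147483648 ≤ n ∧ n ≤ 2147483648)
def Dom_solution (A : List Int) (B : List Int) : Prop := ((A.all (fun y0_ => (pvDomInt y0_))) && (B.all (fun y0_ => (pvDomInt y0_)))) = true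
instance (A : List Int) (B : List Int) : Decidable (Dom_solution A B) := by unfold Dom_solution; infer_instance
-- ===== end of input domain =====

-- B replaces the recursive dfs over a visited set by a step-counting pointer chase (first-return
-- time = n) with condensed guards; same return value wherever both Pythons return (objective: alternative).

-- ===== PORT A =====
-- Python's dfs mutates `visited`; here it is threaded and returned.  The recursion is ported with
-- fuel A.length + 1, exact on every input the guards let through: each recursive call adds a fresh
-- element of `nodes` (|nodes| = |A|) to `visited`, so at most |A| + 1 calls ever happen.
def dfsA (g : PySem.Dict Int Int) (fuel : Nat) (visited : PySem.Set Int) (cur : Int) : PySem.Set Int :=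
  match fuel with
  | 0 => visited
  | f + 1 =>
    if PySem.Set.contains visited cur then visited
    else dfsA g f (PySem.Set.add visited cur) (PySem.Dict.getD g cur 0)

def solution (A : List Int) (B : List Int) : Bool :=
  let setA : PySem.Set Int := PySem.Set.ofList A
  let setB : PySem.Set Int := PySem.Set.ofList B
  let nodes : PySem.Set Int := PySem.Set.union setA setB
  if nodes.length ≠ A.length ∨ nodes.length ≠ B.length then false
  else if A.length ≠ setA.length ∨ B.length ≠ setB.length then false
  else
    let g : PySem.Dict Int Int :=
      (PySem.List.pyRange 0 (A.length : Int) 1).foldl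
        (fun d i => d.insert (PySem.List.pyGetD A i 0) (PySem.List.pyGetD B i 0)) PySem.Dict.empty
    -- A[0]: the IndexError on A = [] ∧ B = [] is excluded by Pre_solution
    let visited := dfsA g (A.length + 1) PySem.Set.empty (PySem.List.pyGetD A 0 0)
    decide (visited.length = nodes.length)

-- ===== PORT B =====
-- the while loop of Source B, with fuel n (it runs at most n - 1 iterations: steps goes 1 → n)
def walkB (g : PySem.Dict Int Int) (n : Nat) (start : Int) (fuel : Nat) (cur : Int) (steps : Nat) :
    Int × Nat :=
  match fuel with
  | 0 => (cur, steps)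
  | f + 1 =>
    if cur ≠ start ∧ steps < n then walkB g n start f (PySem.Dict.getD g cur 0) (steps + 1)
    else (cur, steps)

def solution_alt (A : List Int) (B : List Int) : Bool :=
  let n := A.length
  if B.length ≠ n ∨ (PySem.Set.ofList A).length ≠ n ∨
      PySem.Set.equal (PySem.Set.ofList A) (PySem.Set.ofList B) = false then false
  else
    let g : PySem.Dict Int Int :=
      (A.zip B).foldl (fun d p => d.insert p.1 p.2) PySem.Dict.empty
    let start := PySem.List.pyGetD A 0 0   -- A[0]: A = [] ∧ B = [] is excluded by Pre_solution
    let r := walkB g n start n (PySem.Dict.getD g start 0) 1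
    decide (r.1 = start) && decide (r.2 = n)

-- ===== PRECONDITION & SPEC =====
-- Pre_ excludes only the input A = [] ∧ B = [], on which both Pythons raise IndexError at A[0].
def Pre_solution (A : List Int) (B : List Int) : Prop := ¬ (A = [] ∧ B = [])
instance (A : List Int) (B : List Int) : Decidable (Pre_solution A B) := by
  unfold Pre_solution; infer_instance

def pvWitness_solution : List Int × List Int := ([1, 2], [2, 1])

def Spec_solution (A : List Int) (B : List Int) (out : Bool) : Prop := out = solution_alt A B
instance (A : List Int) (B : List Int) (out : Bool) : Decidable (Spec_solution A B out) := by
  unfold Spec_solution; infer_instance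

-- ===== CLAIM (what is proved, stated in full; the proofs are below) =====
def Claim_equal_solution : Prop :=
  ∀ (A : List Int) (B : List Int), Dom_solution A B → Pre_solution A B →
    Spec_solution A B (solution A B)

-- ===== LEMMAS AND PROOFS =====

lemma pv_len_ofList_eq_card (xs : List Int) :
    (PySem.Set.ofList xs).length = xs.toFinset.card := by
  have h2 := List.toFinset_card_of_nodup (PySem.Set.nodup_ofList xs)
  have h1 : (PySem.Set.ofList xs).toFinset = xs.toFinset := by
    ext y; simp [List.mem_toFinset, PySem.Set.mem_ofList]
  rw [← h2, h1]

lemma pv_len_union_eq_card (A B : List Int) :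
    (PySem.Set.union (PySem.Set.ofList A) (PySem.Set.ofList B)).length
      = (A.toFinset ∪ B.toFinset).card := by
  have hnd : (PySem.Set.union (PySem.Set.ofList A) (PySem.Set.ofList B)).Nodup :=
    PySem.Set.nodup_union _ _ (PySem.Set.nodup_ofList A)
  have h2 := List.toFinset_card_of_nodup hnd
  have h1 : (PySem.Set.union (PySem.Set.ofList A) (PySem.Set.ofList B)).toFinset
      = A.toFinset ∪ B.toFinset := by
    ext y
    simp [List.mem_toFinset, PySem.Set.mem_union, PySem.Set.mem_ofList, Finset.mem_union]
  rw [← h2, h1]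

lemma pv_nodup_of_len (xs : List Int) (h : (PySem.Set.ofList xs).length = xs.length) :
    xs.Nodup := by
  have h1 : xs.toFinset.card = xs.length := by rw [← pv_len_ofList_eq_card]; exact h
  have h2 : xs.dedup.length = xs.length := by rw [← List.card_toFinset]; exact h1
  have h3 : xs.dedup = xs := (List.dedup_sublist xs).eq_of_length h2
  rw [← h3]; exact List.nodup_dedup xs

lemma pv_equal_iff (A B : List Int) :
    PySem.Set.equal (PySem.Set.ofList A) (PySem.Set.ofList B) = true
      ↔ A.toFinset = B.toFinset := by
  rw [PySem.Set.equal_iff]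
  constructor
  · intro h; ext y
    simpa [List.mem_toFinset, PySem.Set.mem_ofList] using h y
  · intro h y
    have := Finset.ext_iff.mp h y
    simpa [List.mem_toFinset, PySem.Set.mem_ofList] using this

lemma pv_guards_iff (A B : List Int) :
    ((PySem.Set.union (PySem.Set.ofList A) (PySem.Set.ofList B)).length = A.length ∧
     (PySem.Set.union (PySem.Set.ofList A) (PySem.Set.ofList B)).length = B.length ∧
     A.length = (PySem.Set.ofList A).length ∧ B.length = (PySem.Set.ofList B).length)
    ↔ (B.length = A.length ∧ (PySem.Set.ofList A).length = A.length ∧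
       PySem.Set.equal (PySem.Set.ofList A) (PySem.Set.ofList B) = true) := by
  rw [pv_len_union_eq_card, pv_len_ofList_eq_card A, pv_len_ofList_eq_card B, pv_equal_iff]
  constructor
  · rintro ⟨h1, h2, h3, h4⟩
    have hsub : A.toFinset ⊆ A.toFinset ∪ B.toFinset := Finset.subset_union_left
    have e1 : A.toFinset = A.toFinset ∪ B.toFinset :=
      Finset.eq_of_subset_of_card_le hsub (by omega)
    have hBsub : B.toFinset ⊆ A.toFinset := by rw [e1]; exact Finset.subset_union_right
    have e2 : B.toFinset = A.toFinset := Finset.eq_of_subset_of_card_le hBsub (by omega)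
    exact ⟨by omega, by omega, e2.symm⟩
  · rintro ⟨h1, h2, h3⟩
    have hcB : B.toFinset.card = A.toFinset.card := by rw [h3]
    have hu : A.toFinset ∪ B.toFinset = A.toFinset := by rw [h3, Finset.union_self]
    rw [hu]
    refine ⟨by omega, by omega, by omega, by omega⟩

lemma pv_nodup_getElem_inj (l : List Int) (h : l.Nodup) (i j : Nat)
    (hi : i < l.length) (hj : j < l.length) (he : l[i] = l[j]) : i = j := by
  have h' : l.Pairwise (· ≠ ·) := h
  by_contra hne
  rcases Nat.lt_or_ge i j with hlt | hge
  · exact List.pairwise_iff_getElem.mp h' i j hi hj hlt he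
  · have hlt : j < i := by omega
    exact List.pairwise_iff_getElem.mp h' j i hj hi hlt he.symm

lemma pv_items_zip (A B : List Int) (hA : A.Nodup) (hlen : B.length = A.length) :
    ((A.zip B).foldl (fun d p => d.insert p.1 p.2)
      (PySem.Dict.empty : PySem.Dict Int Int)).items = A.zip B := by
  have hmap : (A.zip B).map Prod.fst = A := List.map_fst_zip (by omega)
  have hemp : (PySem.Dict.empty : PySem.Dict Int Int).items = [] := rfl
  have h := PySem.Dict.items_foldl_insert_fresh (A.zip B) Prod.fst Prod.snd
      (PySem.Dict.empty : PySem.Dict Int Int)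
      (fun p _ => PySem.Dict.contains_empty p.1) (by rw [hmap]; exact hA)
  simpa [hemp] using h

lemma pv_getD_zip (A B : List Int) (hA : A.Nodup) (hlen : B.length = A.length)
    (i : Nat) (hi : i < A.length) (hi' : i < B.length) :
    ((A.zip B).foldl (fun d p => d.insert p.1 p.2)
      (PySem.Dict.empty : PySem.Dict Int Int)).getD (A[i]'hi) 0 = B[i]'hi' := by
  have hitems := pv_items_zip A B hA hlen
  have hkeys : ((A.zip B).foldl (fun d p => d.insert p.1 p.2)
      (PySem.Dict.empty : PySem.Dict Int Int)).keys.Nodup := by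
    rw [show ((A.zip B).foldl (fun d p => d.insert p.1 p.2)
        (PySem.Dict.empty : PySem.Dict Int Int)).keys
      = ((A.zip B).foldl (fun d p => d.insert p.1 p.2)
        (PySem.Dict.empty : PySem.Dict Int Int)).items.map Prod.fst from rfl, hitems,
      List.map_fst_zip (show A.length ≤ B.length by omega)]
    exact hA
  have hzlen : i < (A.zip B).length := by simp [List.length_zip]; omega
  have hget : (A.zip B)[i]'hzlen = (A[i]'hi, B[i]'hi') := List.getElem_zip ..
  have hmem : (A[i]'hi, B[i]'hi') ∈ ((A.zip B).foldl (fun d p => d.insert p.1 p.2)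
      (PySem.Dict.empty : PySem.Dict Int Int)).items := by
    rw [hitems, ← hget]; exact List.getElem_mem hzlen
  apply PySem.Dict.getD_of_mem_items <;> first | exact hmem | exact hkeys

lemma pv_dfsA_run (g : PySem.Dict Int Int) (c : Nat → Int) (t : Nat)
    (hstep : ∀ k, c (k + 1) = PySem.Dict.getD g (c k) 0)
    (ht : 1 ≤ t) (hret : c t = c 0)
    (hfresh : ∀ j k, j < k → k < t → c j ≠ c k) :
    ∀ fuel k, k ≤ t → t - k < fuel →
      dfsA g fuel ((List.range k).map c) (c k) = (List.range t).map c := by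
  intro fuel
  induction fuel with
  | zero => intro k hk hf; omega
  | succ f ih =>
    intro k hk hf
    rcases eq_or_lt_of_le hk with rfl | hkt
    · have hmem : c k ∈ (List.range k).map c := by
        rw [hret]
        exact List.mem_map.mpr ⟨0, List.mem_range.mpr (by omega), rfl⟩
      have hcont : PySem.Set.contains ((List.range k).map c) (c k) = true := by
        rw [PySem.Set.contains_iff]; exact hmem
      simp only [dfsA]
      rw [if_pos hcont]
    · have hnmem : c k ∉ (List.range k).map c := by
        intro hm
        rcases List.mem_map.mp hm with ⟨j, hj, hje⟩
        exact hfresh j k (List.mem_range.mp hj) hkt hje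
      have hcont : PySem.Set.contains ((List.range k).map c) (c k) = false := by
        cases hcase : PySem.Set.contains ((List.range k).map c) (c k)
        · rfl
        · rw [PySem.Set.contains_iff] at hcase; exact absurd hcase hnmem
      have hadd : PySem.Set.add ((List.range k).map c) (c k) = (List.range (k + 1)).map c := by
        rw [PySem.Set.add_eq_ite, if_neg hnmem, List.range_succ, List.map_append]
        simp
      have hg : PySem.Dict.getD g (c k) 0 = c (k + 1) := (hstep k).symm
      simp only [dfsA]
      rw [if_neg (by intro hcc; rw [PySem.Set.contains_iff] at hcc; exact hnmem hcc),
        hadd, hg]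
      exact ih (k + 1) (by omega) (by omega)

lemma pv_walkB_run (g : PySem.Dict Int Int) (c : Nat → Int) (t n : Nat)
    (hstep : ∀ k, c (k + 1) = PySem.Dict.getD g (c k) 0)
    (ht : 1 ≤ t) (htn : t ≤ n) (hret : c t = c 0)
    (hmin : ∀ m, 1 ≤ m → m < t → c m ≠ c 0) :
    ∀ fuel k, 1 ≤ k → k ≤ t → t - k ≤ fuel →
      walkB g n (c 0) fuel (c k) k = (c 0, t) := by
  intro fuel
  induction fuel with
  | zero =>
    intro k h1 h2 h3
    have hkt : k = t := by omega
    subst hkt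
    simp [walkB, hret]
  | succ f ih =>
    intro k h1 h2 h3
    rcases eq_or_lt_of_le h2 with rfl | hkt
    · simp [walkB, hret]
    · have hne : c k ≠ c 0 := hmin k h1 hkt
      have hlt : k < n := by omega
      rw [show walkB g n (c 0) (f + 1) (c k) k
          = walkB g n (c 0) f (PySem.Dict.getD g (c k) 0) (k + 1) from by
        simp [walkB, hne, hlt]]
      rw [← hstep k]
      exact ih (k + 1) (by omega) (by omega) (by omega)

lemma pv_core (A B : List Int) (hne : A ≠ []) (hlen : B.length = A.length)
    (hA : A.Nodup) (hB : B.Nodup) (hmemAB : ∀ x, x ∈ A ↔ x ∈ B) :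
    ∃ t : Nat, 1 ≤ t ∧ t ≤ A.length ∧
      (dfsA ((A.zip B).foldl (fun d p => d.insert p.1 p.2) PySem.Dict.empty) (A.length + 1)
          PySem.Set.empty (PySem.List.pyGetD A 0 0)).length = t ∧
      walkB ((A.zip B).foldl (fun d p => d.insert p.1 p.2) PySem.Dict.empty) A.length
          (PySem.List.pyGetD A 0 0) A.length
          (PySem.Dict.getD ((A.zip B).foldl (fun d p => d.insert p.1 p.2) PySem.Dict.empty)
            (PySem.List.pyGetD A 0 0) 0) 1
        = (PySem.List.pyGetD A 0 0, t) := by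
  have h0 : 0 < A.length := by
    cases A with
    | nil => exact absurd rfl hne
    | cons a as => simp
  set g := (A.zip B).foldl (fun d p => d.insert p.1 p.2)
    (PySem.Dict.empty : PySem.Dict Int Int) with hgdef
  have hstart : PySem.List.pyGetD A 0 0 = A[0]'h0 := by
    rw [PySem.List.pyGetD_eq_getElem A 0 (by norm_num) (by exact_mod_cast h0)]
    simp
  have hgd : ∀ (i : Nat) (hi : i < A.length), g.getD (A[i]'hi) 0 = B[i]'(by omega) :=
    fun i hi => pv_getD_zip A B hA hlen i hi (by omega)
  have hmaps : ∀ x ∈ A, g.getD x 0 ∈ A := by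
    intro x hx
    rcases List.mem_iff_getElem.mp hx with ⟨i, hi, rfl⟩
    rw [hgd i hi]
    exact (hmemAB _).mpr (List.getElem_mem (by omega))
  have hinj : ∀ x ∈ A, ∀ y ∈ A, g.getD x 0 = g.getD y 0 → x = y := by
    intro x hx y hy hxy
    rcases List.mem_iff_getElem.mp hx with ⟨i, hi, rfl⟩
    rcases List.mem_iff_getElem.mp hy with ⟨j, hj, rfl⟩
    rw [hgd i hi, hgd j hj] at hxy
    have hij : i = j := pv_nodup_getElem_inj B hB i j (by omega) (by omega) hxy
    subst hij
    rfl
  set c : Nat → Int := fun k => (fun x => PySem.Dict.getD g x 0)^[k] (A[0]'h0) with hcdef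
  have hstep : ∀ k, c (k + 1) = g.getD (c k) 0 := by
    intro k
    simp only [hcdef]
    exact Function.iterate_succ_apply' (fun x => PySem.Dict.getD g x 0) k _
  have hc0 : c 0 = A[0]'h0 := by simp [hcdef]
  have hcmem : ∀ k, c k ∈ A := by
    intro k
    induction k with
    | zero => rw [hc0]; exact List.getElem_mem h0
    | succ k ihk => rw [hstep k]; exact hmaps _ ihk
  have hcancel : ∀ d i, c i = c (i + d) → c 0 = c d := by
    intro d i
    induction i with
    | zero => intro h; simpa using h
    | succ i ihi =>
      intro h
      apply ihi
      have e1 : g.getD (c i) 0 = g.getD (c (i + d)) 0 := by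
        rw [← hstep i, ← hstep (i + d)]
        rw [show i + d + 1 = i + 1 + d from by omega]
        exact h
      exact hinj _ (hcmem i) _ (hcmem (i + d)) e1
  have hexists : ∃ k, 1 ≤ k ∧ k ≤ A.length ∧ c k = c 0 := by
    have hcard : A.toFinset.card < (Finset.range (A.length + 1)).card := by
      rw [Finset.card_range, List.toFinset_card_of_nodup hA]; omega
    obtain ⟨i, hi, j, hj, hij, hcij⟩ :=
      Finset.exists_ne_map_eq_of_card_lt_of_maps_to hcard
        (fun k _ => List.mem_toFinset.mpr (hcmem k))
    rw [Finset.mem_range] at hi hj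
    rcases Nat.lt_or_ge i j with hlt | hge
    · refine ⟨j - i, by omega, by omega, ?_⟩
      have := hcancel (j - i) i (by rw [show i + (j - i) = j from by omega]; exact hcij)
      exact this.symm
    · have hlt : j < i := by omega
      refine ⟨i - j, by omega, by omega, ?_⟩
      have := hcancel (i - j) j (by rw [show j + (i - j) = i from by omega]; exact hcij.symm)
      exact this.symm
  set t := Nat.find hexists with htdef
  have ht1 : 1 ≤ t := (Nat.find_spec hexists).1
  have htn : t ≤ A.length := (Nat.find_spec hexists).2.1
  have htret : c t = c 0 := (Nat.find_spec hexists).2.2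
  have hmin : ∀ m, 1 ≤ m → m < t → c m ≠ c 0 := by
    intro m hm1 hm2 he
    exact Nat.find_min hexists hm2 ⟨hm1, by omega, he⟩
  have hfresh : ∀ j k, j < k → k < t → c j ≠ c k := by
    intro j k hjk hkt he
    have := hcancel (k - j) j (by rw [show j + (k - j) = k from by omega]; exact he)
    exact hmin (k - j) (by omega) (by omega) this.symm
  have e1 : PySem.List.pyGetD A 0 0 = c 0 := by rw [hstart, hc0]
  refine ⟨t, ht1, htn, ?_, ?_⟩
  · rw [e1]
    have hrun := pv_dfsA_run g c t hstep ht1 htret hfresh (A.length + 1) 0 (by omega) (by omega)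
    show (dfsA g (A.length + 1) ((List.range 0).map c) (c 0)).length = t
    rw [hrun]
    simp
  · rw [e1, ← hstep 0]
    show walkB g A.length (c 0) A.length (c 1) 1 = (c 0, t)
    exact pv_walkB_run g c t A.length hstep ht1 htn htret hmin A.length 1 (le_refl 1) ht1
      (by omega)

lemma pv_build_eq (A : List Int) : ∀ (B : List Int), B.length = A.length →
    ∀ (d0 : PySem.Dict Int Int),
    (PySem.List.pyRange 0 (A.length : Int) 1).foldl
      (fun d i => d.insert (PySem.List.pyGetD A i 0) (PySem.List.pyGetD B i 0)) d0
    = (A.zip B).foldl (fun d p => d.insert p.1 p.2) d0 := by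
  induction A using List.reverseRecOn with
  | nil =>
    intro B hlen d0
    have hB : B = [] := by
      cases B with
      | nil => rfl
      | cons b bs => simp at hlen
    subst hB
    simp only [List.length_nil, Nat.cast_zero]
    rw [PySem.List.pyRange_one_eq_nil (le_refl 0)]
    simp
  | append_singleton A' a ih =>
    intro B hlen d0
    have hBne : B ≠ [] := by
      intro h
      subst h
      simp at hlen
    obtain ⟨B', b, rfl⟩ : ∃ B' b, B = B' ++ [b] := by
      rcases List.eq_nil_or_concat B with h | ⟨B', b, h⟩
      · exact absurd h hBne
      · exact ⟨B', b, by rw [h, List.concat_eq_append]⟩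
    have hlen' : B'.length = A'.length := by
      simp [List.length_append] at hlen
      omega
    have hn : (((A' ++ [a]).length : Nat) : Int) = (A'.length : Int) + 1 := by
      simp [List.length_append]
    rw [hn, PySem.List.pyRange_one_succ_right (Int.natCast_nonneg A'.length),
      List.foldl_append]
    simp only [List.foldl_cons, List.foldl_nil]
    have hga : PySem.List.pyGetD (A' ++ [a]) ((A'.length : Nat) : Int) 0 = a := by
      rw [PySem.List.pyGetD_natCast, List.getD_append_right A' [a] 0 A'.length (le_refl _)]
      simp
    have hgb : PySem.List.pyGetD (B' ++ [b]) ((A'.length : Nat) : Int) 0 = b := by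
      rw [PySem.List.pyGetD_natCast, ← hlen',
        List.getD_append_right B' [b] 0 B'.length (le_refl _)]
      simp
    rw [hga, hgb]
    have hcongr : (PySem.List.pyRange 0 (A'.length : Int) 1).foldl
        (fun d i => d.insert (PySem.List.pyGetD (A' ++ [a]) i 0)
          (PySem.List.pyGetD (B' ++ [b]) i 0)) d0
        = (PySem.List.pyRange 0 (A'.length : Int) 1).foldl
        (fun d i => d.insert (PySem.List.pyGetD A' i 0) (PySem.List.pyGetD B' i 0)) d0 := by
      apply PySem.List.foldl_congr_mem
      intro acc x hx
      rw [PySem.List.mem_pyRange_one] at hx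
      have hxa : x.toNat < A'.length := by omega
      have hxb : x.toNat < B'.length := by omega
      rw [PySem.List.pyGetD_eq_getElem (A' ++ [a]) 0 hx.1
          (by simp only [List.length_append, List.length_cons, List.length_nil]; push_cast; omega),
        PySem.List.pyGetD_eq_getElem (B' ++ [b]) 0 hx.1
          (by simp only [List.length_append, List.length_cons, List.length_nil]; push_cast; omega),
        PySem.List.pyGetD_eq_getElem A' 0 hx.1 (by exact hx.2),
        PySem.List.pyGetD_eq_getElem B' 0 hx.1 (by omega),
        List.getElem_append_left hxa, List.getElem_append_left hxb]
    rw [hcongr, ih B' hlen' d0, List.zip_append hlen'.symm, List.foldl_append]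
    simp

-- ===== VERDICT (by name: the statement is the Claim_ definition above) =====
theorem solution_spec : Claim_equal_solution := by
  unfold Claim_equal_solution
  intro A B hdom hpre
  unfold Spec_solution
  show solution A B = solution_alt A B
  by_cases hok : (B.length = A.length ∧ (PySem.Set.ofList A).length = A.length ∧
      PySem.Set.equal (PySem.Set.ofList A) (PySem.Set.ofList B) = true)
  · obtain ⟨hlen, hlenA, heq⟩ := hok
    have hA : A.Nodup := pv_nodup_of_len A hlenA
    have hFin : A.toFinset = B.toFinset := (pv_equal_iff A B).mp heq
    have hlenB : (PySem.Set.ofList B).length = B.length := by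
      rw [pv_len_ofList_eq_card, ← hFin, List.toFinset_card_of_nodup hA]
      omega
    have hB : B.Nodup := pv_nodup_of_len B hlenB
    have hmemAB : ∀ x, x ∈ A ↔ x ∈ B := by
      intro x
      have := Finset.ext_iff.mp hFin x
      simpa [List.mem_toFinset] using this
    have hne : A ≠ [] := by
      intro h
      subst h
      refine hpre ⟨rfl, ?_⟩
      cases B with
      | nil => rfl
      | cons b bs => simp at hlen
    have h4 := (pv_guards_iff A B).mpr ⟨hlen, hlenA, heq⟩
    obtain ⟨t, ht1, htn, hdfs, hwalk⟩ := pv_core A B hne hlen hA hB hmemAB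
    simp only [solution, solution_alt]
    rw [if_neg (by push Not; exact ⟨h4.1, h4.2.1⟩),
      if_neg (by push Not; exact ⟨h4.2.2.1, h4.2.2.2⟩),
      if_neg (by push Not; exact ⟨hlen, hlenA, by simp [heq]⟩)]
    rw [pv_build_eq A B hlen, hdfs, h4.1, hwalk]
    simp
  · simp only [solution, solution_alt]
    have hBcond : (B.length ≠ A.length ∨ (PySem.Set.ofList A).length ≠ A.length ∨
        PySem.Set.equal (PySem.Set.ofList A) (PySem.Set.ofList B) = false) := by
      by_contra hc
      push Not at hc
      obtain ⟨h1, h2, h3⟩ := hc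
      apply hok
      refine ⟨h1, h2, ?_⟩
      cases hcase : PySem.Set.equal (PySem.Set.ofList A) (PySem.Set.ofList B)
      · exact absurd hcase h3
      · rfl
    rw [if_pos hBcond]
    by_cases h1 : ((PySem.Set.union (PySem.Set.ofList A) (PySem.Set.ofList B)).length ≠ A.length ∨
        (PySem.Set.union (PySem.Set.ofList A) (PySem.Set.ofList B)).length ≠ B.length)
    · rw [if_pos h1]
    · push Not at h1
      by_cases h2 : (A.length ≠ (PySem.Set.ofList A).length ∨
          B.length ≠ (PySem.Set.ofList B).length)
      · rw [if_neg (by push Not; exact h1), if_pos h2]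
      · push Not at h2
        exact absurd ((pv_guards_iff A B).mp ⟨h1.1, h1.2, h2.1, h2.2⟩) hok
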